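-- pv_equiv track=rewrite | github.com/Jowohny/LeetCode | Easy Problems/Remove Letter To Equalize Frequency/RemoveLetterToEqualizeFrequency.py | equalFrequency
-- ===== SOURCE A (Python) =====
-- from collections import Counter
--
-- def equalFrequency(word: str) -> bool:
--     #create a Counter to store all the frequencies of the letters
--     freq = Counter(word)
--
--     #for every different letter, remove one instance of it from the frequency
--     for ch in freq:
--         freq[ch] -= 1
--
--         #add all the non zero frequencies of the remaining letters to the list
--         remaining = []
--         for f in freq.values():
--             if f > 0:
--                 remaining.append(f)
--
--         #convert the remaining frequency list into a set, if the length of the set is 1, then all letters have equal frequency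
--         if len(set(remaining)) == 1:
--             return True
--
--         #add a frequency back to the letter to test other cases
--         freq[ch] += 1
--
--     #return false if running through the enture frequency array with no true
--     return False
-- ===== SOURCE B (Python) =====
-- from collections import Counter
--
-- def equalFrequency(word: str) -> bool:
--     freq = Counter(word)
--     cc = Counter(freq.values())          # how many letters have each frequency
--     vals = sorted(cc)                    # the distinct frequencies, ascending
--     if len(vals) == 1:
--         v = vals[0]
--         # all letters share one frequency: removable iff v == 1 (several letters)
--         # or there is a single letter appearing v >= 2 times
--         return (v == 1 and len(freq) >= 2) or (v >= 2 and len(freq) == 1)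
--     if len(vals) == 2:
--         lo, hi = vals
--         # drop the unique letter of frequency 1, or decrement the unique letter
--         # whose frequency is one above the rest
--         return (lo == 1 and cc[lo] == 1) or (hi == lo + 1 and cc[hi] == 1)
--     return False
-- ===== Notes on version B (the rewrite author's own statement) =====
-- stated objective: simpler
-- what changed: A tries every distinct letter, decrements it and rescans all remaining frequencies; B replaces the try-each-removal loop by a closed-form test on the counter of frequency values (at most two distinct frequencies can work, with fixed arithmetic conditions).
import Mathlib
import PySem

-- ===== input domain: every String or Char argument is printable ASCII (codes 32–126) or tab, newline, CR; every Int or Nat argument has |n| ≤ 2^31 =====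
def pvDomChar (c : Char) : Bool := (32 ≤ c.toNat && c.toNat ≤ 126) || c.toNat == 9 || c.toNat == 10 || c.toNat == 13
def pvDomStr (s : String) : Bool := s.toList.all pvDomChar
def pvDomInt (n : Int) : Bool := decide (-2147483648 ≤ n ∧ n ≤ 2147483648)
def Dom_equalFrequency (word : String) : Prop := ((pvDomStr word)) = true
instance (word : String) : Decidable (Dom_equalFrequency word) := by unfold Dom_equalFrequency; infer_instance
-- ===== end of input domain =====

-- B replaces A's try-each-letter-removal loop by a closed-form test on the
-- counter of frequency values; same return value, no side effects in either.

-- ===== PORT A =====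
-- the 'for ch in freq' loop: decrement, collect positive frequencies, test, restore
def equalFrequencyLoop (d : PySem.Dict Char Int) : List Char → Bool
  | [] => false
  | ch :: rest =>
    let d1 := d.modify ch 0 (· - 1)
    let remaining := d1.values.foldl (fun acc f => if f > 0 then acc ++ [f] else acc) []
    if (PySem.Set.ofList remaining).length = 1 then true
    else equalFrequencyLoop (d1.modify ch 0 (· + 1)) rest

def equalFrequency (word : String) : Bool :=
  let freq := PySem.Dict.counter word.toList
  equalFrequencyLoop freq freq.keys

-- ===== PORT B =====
def equalFrequency_alt (word : String) : Bool :=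
  let freq := PySem.Dict.counter word.toList
  let cc := PySem.Dict.counter freq.values
  let vals := PySem.List.sorted cc.keys (fun x => x) false
  match vals with
  | [v] => (v == 1 && decide (2 ≤ freq.size)) || (decide (2 ≤ v) && freq.size == 1)
  | [lo, hi] => (lo == 1 && cc.getD lo 0 == 1) || (hi == lo + 1 && cc.getD hi 0 == 1)
  | _ => false

-- ===== PRECONDITION & SPEC =====
def Spec_equalFrequency (word : String) (out : Bool) : Prop := out = equalFrequency_alt word
instance (word : String) (out : Bool) : Decidable (Spec_equalFrequency word out) := by unfold Spec_equalFrequency; infer_instance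

-- ===== CLAIM (what is proved, stated in full; the proofs are below) =====
def Claim_equal_equalFrequency : Prop := ∀ (word : String), Dom_equalFrequency word → Spec_equalFrequency word (equalFrequency word)

-- ===== LEMMAS AND PROOFS =====

-- the positive frequencies left after decrementing letter ch, as a multiset
def remSet (K : List Char) (g : Char → Int) (ch : Char) : List Int :=
  (K.map fun k => if k = ch then g ch - 1 else g k).filter (fun f => decide (f > 0))

def AllEq (l : List Int) : Prop := ∀ x ∈ l, ∀ y ∈ l, x = y

-- A's per-letter test: some positive frequency remains and all remaining are equal
def OK (K : List Char) (g : Char → Int) (ch : Char) : Prop :=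
  remSet K g ch ≠ [] ∧ AllEq (remSet K g ch)

lemma insert_getD_self (d : PySem.Dict Char Int) (ch : Char)
    (hnd : d.keys.Nodup) (hc : ch ∈ d.keys) : d.insert ch (d.getD ch 0) = d := by
  have hcont : d.contains ch = true := (PySem.Dict.contains_iff_mem_keys d ch).mpr hc
  apply PySem.Dict.ext
  rw [PySem.Dict.items_insert_of_contains d (d.getD ch 0) hcont]
  conv_rhs => rw [← List.map_id d.items]
  apply List.map_congr_left
  intro p hp
  by_cases h : p.1 = ch
  · have h2 : d.getD ch 0 = p.2 := by
      have := PySem.Dict.getD_of_mem_items (d := d) (k := p.1) (v := p.2) (by simpa using hp) hnd 0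
      rw [h] at this; exact this
    simp [h, h2]
    exact Prod.ext h.symm rfl
  · simp [h]

lemma modify_restore (d : PySem.Dict Char Int) (ch : Char)
    (hnd : d.keys.Nodup) (hc : ch ∈ d.keys) :
    ((d.modify ch 0 (· - 1)).modify ch 0 (· + 1)) = d := by
  show ((d.modify ch 0 (· - 1)).insert ch ((d.modify ch 0 (· - 1)).getD ch 0 + 1)) = d
  have h1 : (d.modify ch 0 (· - 1)).getD ch 0 = d.getD ch 0 - 1 :=
    PySem.Dict.getD_modify_self d ch 0 _
  rw [h1]
  show ((d.insert ch (d.getD ch 0 - 1)).insert ch (d.getD ch 0 - 1 + 1)) = d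
  rw [PySem.Dict.insert_insert_self]
  have : d.getD ch 0 - 1 + 1 = d.getD ch 0 := by ring
  rw [this]
  exact insert_getD_self d ch hnd hc

lemma values_modify_sub (d : PySem.Dict Char Int) (ch : Char) (hnd : d.keys.Nodup)
    (hc : ch ∈ d.keys) :
    (d.modify ch 0 (· - 1)).values
      = d.keys.map (fun k => if k = ch then d.getD ch 0 - 1 else d.getD k 0) := by
  have hcont : d.contains ch = true := (PySem.Dict.contains_iff_mem_keys d ch).mpr hc
  have hk : (d.modify ch 0 (· - 1)).keys = d.keys := by
    show (d.insert ch _).keys = d.keys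
    exact PySem.Dict.keys_insert_of_contains d _ hcont
  have hnd' : (d.modify ch 0 (· - 1)).keys.Nodup := by rw [hk]; exact hnd
  rw [PySem.Dict.values_eq_map_keys _ hnd' 0, hk]
  apply List.map_congr_left
  intro k hk2
  rw [PySem.Dict.getD_modify]

lemma ofList_length_one_iff (l : List Int) :
    ((PySem.Set.ofList l).length = 1) ↔ (l ≠ [] ∧ AllEq l) := by
  rw [List.length_eq_one_iff]
  constructor
  · rintro ⟨a, ha⟩
    have hm : ∀ x, x ∈ l ↔ x = a := by
      intro x
      rw [← PySem.Set.mem_ofList l x, ha]; simp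
    constructor
    · intro h0
      subst h0
      simpa using (hm a).mpr rfl
    · intro x hx y hy
      rw [(hm x).mp hx, (hm y).mp hy]
  · rintro ⟨hne, hall⟩
    obtain ⟨a, l', rfl⟩ := List.exists_cons_of_ne_nil hne
    refine ⟨a, ?_⟩
    have hmem : a ∈ PySem.Set.ofList (a :: l') := by
      rw [PySem.Set.mem_ofList]; simp
    have hnd := PySem.Set.nodup_ofList (a :: l')
    have hsub : ∀ x ∈ PySem.Set.ofList (a :: l'), x = a := by
      intro x hx
      exact hall x ((PySem.Set.mem_ofList _ _).mp hx) a (by simp)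
    match hS : PySem.Set.ofList (a :: l') with
    | [] => rw [hS] at hmem; simp at hmem
    | [b] => rw [hS] at hsub; simp at hsub; rw [hsub]
    | b :: c :: t =>
      rw [hS] at hsub hnd
      have hb := hsub b (by simp)
      have hc := hsub c (by simp)
      simp [hb, hc] at hnd

lemma remaining_eq_filter (l : List Int) :
    l.foldl (fun acc f => if f > 0 then acc ++ [f] else acc) []
      = l.filter (fun f => decide (f > 0)) := by
  have h := PySem.List.foldl_append_if (fun f : Int => decide (f > 0)) id l []
  simpa using h

lemma mem_remSet (K : List Char) (g : Char → Int) (ch : Char) (hch : ch ∈ K) (x : Int) :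
    x ∈ remSet K g ch ↔ 0 < x ∧ (x = g ch - 1 ∨ ∃ k ∈ K, k ≠ ch ∧ g k = x) := by
  unfold remSet
  simp only [List.mem_filter, List.mem_map, decide_eq_true_eq]
  constructor
  · rintro ⟨⟨k, hk, hv⟩, hpos⟩
    refine ⟨hpos, ?_⟩
    by_cases h : k = ch
    · subst h; simp at hv; left; omega
    · right; exact ⟨k, hk, h, by simpa [h] using hv⟩
  · rintro ⟨hpos, h | ⟨k, hk, hne, hv⟩⟩
    · exact ⟨⟨ch, hch, by simp [h]⟩, hpos⟩
    · exact ⟨⟨k, hk, by simp [hne, hv]⟩, hpos⟩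

lemma exists_other_iff_two_le_count (K : List Char) (g : Char → Int) (hnd : K.Nodup)
    (ch : Char) (hch : ch ∈ K) :
    (∃ k ∈ K, k ≠ ch ∧ g k = g ch) ↔ 2 ≤ (K.map g).count (g ch) := by
  have hperm : K.Perm (ch :: K.erase ch) := List.perm_cons_erase hch
  have hcount : (K.map g).count (g ch) = ((ch :: K.erase ch).map g).count (g ch) :=
    (hperm.map g).count_eq (g ch)
  rw [hcount]
  simp only [List.map_cons, List.count_cons_self]
  have hmem_erase : ∀ k, k ∈ K.erase ch ↔ k ∈ K ∧ k ≠ ch := by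
    intro k; rw [List.Nodup.mem_erase_iff hnd]; tauto
  constructor
  · rintro ⟨k, hk, hne, hv⟩
    have : g ch ∈ (K.erase ch).map g := by
      simp only [List.mem_map]; exact ⟨k, (hmem_erase k).mpr ⟨hk, hne⟩, hv⟩
    have := List.one_le_count_iff.mpr this
    omega
  · intro h
    have : g ch ∈ (K.erase ch).map g := List.one_le_count_iff.mp (by omega)
    simp only [List.mem_map] at this
    obtain ⟨k, hk, hv⟩ := this
    obtain ⟨hk1, hk2⟩ := (hmem_erase k).mp hk
    exact ⟨k, hk1, hk2, hv⟩

lemma loop_eq_any (d : PySem.Dict Char Int) (hnd : d.keys.Nodup) :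
    ∀ ks : List Char, (∀ c ∈ ks, c ∈ d.keys) →
    (equalFrequencyLoop d ks = true
      ↔ ∃ ch ∈ ks, OK d.keys (fun k => d.getD k 0) ch) := by
  intro ks
  induction ks with
  | nil => intro _; simp [equalFrequencyLoop]
  | cons ch rest ih =>
    intro hmem
    have hch : ch ∈ d.keys := hmem ch (by simp)
    have hrem : (d.modify ch 0 (· - 1)).values.foldl
        (fun acc f => if f > 0 then acc ++ [f] else acc) []
        = remSet d.keys (fun k => d.getD k 0) ch := by
      rw [remaining_eq_filter, values_modify_sub d ch hnd hch]; rfl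
    show (if (PySem.Set.ofList _).length = 1 then true
          else equalFrequencyLoop ((d.modify ch 0 (· - 1)).modify ch 0 (· + 1)) rest) = true ↔ _
    rw [modify_restore d ch hnd hch, hrem]
    have ihr := ih (fun c hc => hmem c (by simp [hc]))
    by_cases h1 : (PySem.Set.ofList (remSet d.keys (fun k => d.getD k 0) ch)).length = 1
    · simp only [h1, if_pos]
      constructor
      · intro _; exact ⟨ch, by simp, (ofList_length_one_iff _).mp h1⟩
      · intro _; trivial
    · simp only [h1, if_false]
      rw [ihr]
      constructor
      · rintro ⟨c, hc, hok⟩; exact ⟨c, by simp [hc], hok⟩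
      · rintro ⟨c, hc, hok⟩
        rcases List.mem_cons.mp hc with rfl | hc2
        · exact absurd ((ofList_length_one_iff _).mpr hok) h1
        · exact ⟨c, hc2, hok⟩

lemma mem_remSet_of_ne (K : List Char) (g : Char → Int) (ch : Char) (hch : ch ∈ K)
    (x : Int) (hpos : 0 < x) (hx : x ∈ K.map g) (hne : x ≠ g ch) : x ∈ remSet K g ch := by
  rw [mem_remSet K g ch hch]
  obtain ⟨k, hk, hv⟩ := List.mem_map.mp hx
  exact ⟨hpos, Or.inr ⟨k, hk, fun h => hne (h ▸ hv ▸ rfl), hv⟩⟩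

theorem core (K : List Char) (g : Char → Int) (hnd : K.Nodup) (hpos : ∀ k ∈ K, 1 ≤ g k) :
    (∃ ch ∈ K, OK K g ch)
      ↔ ((match PySem.List.sorted (PySem.Set.ofList (K.map g)) (fun x => x) false with
         | [v] => (v == 1 && decide (2 ≤ K.length)) || (decide (2 ≤ v) && K.length == 1)
         | [lo, hi] => (lo == 1 && ((K.map g).count lo : Int) == 1)
                        || (hi == lo + 1 && ((K.map g).count hi : Int) == 1)
         | _ => false) = true) := by
  have hperm : (PySem.List.sorted (PySem.Set.ofList (K.map g)) (fun x => x) false).Perm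
      (PySem.Set.ofList (K.map g)) := PySem.List.sorted_perm _ _ _
  have hmem : ∀ x, x ∈ PySem.List.sorted (PySem.Set.ofList (K.map g)) (fun x => x) false
      ↔ x ∈ K.map g := fun x => (hperm.mem_iff).trans (PySem.Set.mem_ofList _ x)
  have hpw := PySem.List.sorted_ofList_pairwise_lt (K.map g)
  have hposL : ∀ x ∈ K.map g, 1 ≤ x := by
    intro x hx; obtain ⟨k, hk, hv⟩ := List.mem_map.mp hx; exact hv ▸ hpos k hk
  rcases hs : PySem.List.sorted (PySem.Set.ofList (K.map g)) (fun x => x) false with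
    _ | ⟨v, _ | ⟨v2, _ | ⟨v3, t⟩⟩⟩
  · -- empty: no letters
    rw [hs] at hmem
    have hK : K = [] := by
      rcases K with _ | ⟨c, K'⟩
      · rfl
      · exact absurd ((hmem (g c)).mpr (by simp)) (by simp)
    subst hK; simp
  · -- one distinct frequency v
    rw [hs] at hmem
    have hv : ∀ x, x ∈ K.map g ↔ x = v := by intro x; rw [← hmem]; simp
    have hgv : ∀ k ∈ K, g k = v := by
      intro k hk; exact (hv (g k)).mp (List.mem_map.mpr ⟨k, hk, rfl⟩)
    simp only [Bool.or_eq_true, Bool.and_eq_true, beq_iff_eq, decide_eq_true_eq]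
    rcases K with _ | ⟨c1, K'⟩
    · exact absurd ((hmem v).mp (by simp)) (by simp)
    have hgc1 : g c1 = v := hgv c1 (by simp)
    have hv1 : 1 ≤ v := hgc1 ▸ hpos c1 (by simp)
    rcases K' with _ | ⟨c2, K''⟩
    · -- single letter
      have hrs : remSet [c1] g c1 = if 0 < v - 1 then [v - 1] else [] := by
        simp [remSet, hgc1]
        split_ifs with h
        · simp [List.filter, h]
        · simp [List.filter, h]
      constructor
      · rintro ⟨ch, hch, hok⟩
        have hcc : ch = c1 := by simpa using hch
        subst hcc
        rcases hok with ⟨hne, _⟩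
        right
        refine ⟨?_, by simp⟩
        by_contra h
        rw [hrs, if_neg (by omega)] at hne
        exact hne rfl
      · rintro (⟨_, h2⟩ | ⟨h2, _⟩)
        · simp at h2
        · refine ⟨c1, by simp, ?_, ?_⟩
          · rw [hrs, if_pos (by omega)]; simp
          · intro x hx y hy
            rw [hrs, if_pos (by omega : (0:Int) < v - 1)] at hx hy
            simp at hx hy; omega
    · -- at least two letters, all with frequency v
      have hne12 : c2 ≠ c1 := by
        intro h; subst h; simp [List.nodup_cons] at hnd
      have hc1K : c1 ∈ c1 :: c2 :: K'' := by simp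
      have hc2K : c2 ∈ c1 :: c2 :: K'' := by simp
      constructor
      · rintro ⟨ch, hch, ⟨hnil, hall⟩⟩
        left
        have hgch : g ch = v := hgv ch hch
        have hvin : v ∈ remSet (c1 :: c2 :: K'') g ch := by
          -- some other letter also has frequency v
          obtain ⟨k, hk, hkne⟩ : ∃ k ∈ c1 :: c2 :: K'', k ≠ ch := by
            by_cases h : ch = c1
            · exact ⟨c2, hc2K, by rw [h]; exact hne12⟩
            · exact ⟨c1, hc1K, fun hh => h hh.symm⟩
          rw [mem_remSet _ g ch hch]
          exact ⟨by omega, Or.inr ⟨k, hk, hkne, hgv k hk⟩⟩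
        constructor
        · by_contra hv2
          have h2v : 2 ≤ v := by omega
          have hv1in : v - 1 ∈ remSet (c1 :: c2 :: K'') g ch := by
            rw [mem_remSet _ g ch hch]
            exact ⟨by omega, Or.inl (by omega)⟩
          have := hall v hvin (v - 1) hv1in
          omega
        · simp
      · rintro (⟨hv1', _⟩ | ⟨_, hlen⟩)
        · refine ⟨c1, hc1K, ?_, ?_⟩
          · have : (1:Int) ∈ remSet (c1 :: c2 :: K'') g c1 := by
              rw [mem_remSet _ g c1 hc1K]
              exact ⟨by omega, Or.inr ⟨c2, hc2K, hne12, by rw [hgv c2 hc2K]; omega⟩⟩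
            intro h; rw [h] at this; simp at this
          · intro x hx y hy
            rw [mem_remSet _ g c1 hc1K] at hx hy
            rcases hx with ⟨hx0, hx1 | ⟨k, hk, _, hkv⟩⟩
            · rw [hgc1] at hx1; omega
            · rcases hy with ⟨hy0, hy1 | ⟨k', hk', _, hkv'⟩⟩
              · rw [hgc1] at hy1; omega
              · rw [← hkv, ← hkv', hgv k hk, hgv k' hk']
        · simp at hlen
  · -- two distinct frequencies v < v2
    rw [hs] at hmem hpw
    have hlt : v < v2 := by
      rcases List.pairwise_cons.mp hpw with ⟨h, _⟩; exact h v2 (by simp)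
    have hmem2 : ∀ x, x ∈ K.map g ↔ x = v ∨ x = v2 := by
      intro x; rw [← hmem]; simp
    have hloL : v ∈ K.map g := (hmem2 v).mpr (Or.inl rfl)
    have hhiL : v2 ∈ K.map g := (hmem2 v2).mpr (Or.inr rfl)
    have hlo1 : 1 ≤ v := hposL v hloL
    have hhi2 : 2 ≤ v2 := by omega
    obtain ⟨klo, hkloK, hklo⟩ := List.mem_map.mp hloL
    obtain ⟨khi, hkhiK, hkhi⟩ := List.mem_map.mp hhiL
    have hkne : klo ≠ khi := by intro h; rw [h, hkhi] at hklo; omega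
    simp only [Bool.or_eq_true, Bool.and_eq_true, beq_iff_eq]
    constructor
    · rintro ⟨ch, hch, ⟨hnil, hall⟩⟩
      have hgch : g ch = v ∨ g ch = v2 := (hmem2 (g ch)).mp (List.mem_map.mpr ⟨ch, hch, rfl⟩)
      rcases hgch with hglo | hghi
      · -- removed a letter of frequency v
        left
        have hhiR : v2 ∈ remSet K g ch :=
          mem_remSet_of_ne K g ch hch v2 (by omega) hhiL (by omega)
        constructor
        · -- v must be 1
          by_contra hlo2
          have : v - 1 ∈ remSet K g ch := by
            rw [mem_remSet K g ch hch]
            exact ⟨by omega, Or.inl (by omega)⟩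
          have := hall (v - 1) this v2 hhiR
          omega
        · -- count v must be 1
          have hcnt1 : 1 ≤ (K.map g).count v := List.one_le_count_iff.mpr hloL
          by_contra hcnt
          have hcnt2 : 2 ≤ (K.map g).count (g ch) := by
            rw [hglo]
            have : ((K.map g).count v : Int) ≠ 1 := by
              intro h; apply hcnt; exact_mod_cast h
            omega
          obtain ⟨k, hk, hkneq, hkv⟩ := (exists_other_iff_two_le_count K g hnd ch hch).mpr hcnt2
          have hloR : v ∈ remSet K g ch := by
            rw [mem_remSet K g ch hch]
            exact ⟨by omega, Or.inr ⟨k, hk, hkneq, by rw [hkv, hglo]⟩⟩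
          have := hall v hloR v2 hhiR
          omega
      · -- removed a letter of frequency v2
        right
        have hloR : v ∈ remSet K g ch :=
          mem_remSet_of_ne K g ch hch v (by omega) hloL (by omega)
        have hhi1R : v2 - 1 ∈ remSet K g ch := by
          rw [mem_remSet K g ch hch]
          exact ⟨by omega, Or.inl (by omega)⟩
        have heq : v2 - 1 = v := hall (v2 - 1) hhi1R v hloR
        constructor
        · omega
        · have hcnt1 : 1 ≤ (K.map g).count v2 := List.one_le_count_iff.mpr hhiL
          by_contra hcnt
          have hcnt2 : 2 ≤ (K.map g).count (g ch) := by
            rw [hghi]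
            have : ((K.map g).count v2 : Int) ≠ 1 := by
              intro h; apply hcnt; exact_mod_cast h
            omega
          obtain ⟨k, hk, hkneq, hkv⟩ := (exists_other_iff_two_le_count K g hnd ch hch).mpr hcnt2
          have hhiR : v2 ∈ remSet K g ch := by
            rw [mem_remSet K g ch hch]
            exact ⟨by omega, Or.inr ⟨k, hk, hkneq, by rw [hkv, hghi]⟩⟩
          have := hall v2 hhiR v hloR
          omega
    · rintro (⟨hlo1', hcnt⟩ | ⟨hsucc, hcnt⟩)
      · -- drop the unique letter of frequency v = 1
        have hcnt' : (K.map g).count v = 1 := by exact_mod_cast hcnt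
        refine ⟨klo, hkloK, ?_, ?_⟩
        · have : v2 ∈ remSet K g klo :=
            mem_remSet_of_ne K g klo hkloK v2 (by omega) hhiL (by rw [hklo]; omega)
          intro h; rw [h] at this; simp at this
        · intro x hx y hy
          have hx' : x = v2 := by
            rw [mem_remSet K g klo hkloK] at hx
            rcases hx with ⟨hx0, hx1 | ⟨k, hk, hkneq, hkv⟩⟩
            · rw [hklo] at hx1; omega
            · have : x = v ∨ x = v2 := (hmem2 x).mp (by rw [← hkv]; exact List.mem_map.mpr ⟨k, hk, rfl⟩)
              rcases this with rfl | rfl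
              · exfalso
                have : 2 ≤ (K.map g).count (g klo) := by
                  apply (exists_other_iff_two_le_count K g hnd klo hkloK).mp
                  exact ⟨k, hk, hkneq, by rw [hkv, hklo]⟩
                rw [hklo] at this; omega
              · rfl
          have hy' : y = v2 := by
            rw [mem_remSet K g klo hkloK] at hy
            rcases hy with ⟨hy0, hy1 | ⟨k, hk, hkneq, hkv⟩⟩
            · rw [hklo] at hy1; omega
            · have : y = v ∨ y = v2 := (hmem2 y).mp (by rw [← hkv]; exact List.mem_map.mpr ⟨k, hk, rfl⟩)
              rcases this with rfl | rfl
              · exfalso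
                have : 2 ≤ (K.map g).count (g klo) := by
                  apply (exists_other_iff_two_le_count K g hnd klo hkloK).mp
                  exact ⟨k, hk, hkneq, by rw [hkv, hklo]⟩
                rw [hklo] at this; omega
              · rfl
          rw [hx', hy']
      · -- decrement the unique letter of frequency v2 = v + 1
        have hcnt' : (K.map g).count v2 = 1 := by exact_mod_cast hcnt
        refine ⟨khi, hkhiK, ?_, ?_⟩
        · have : v ∈ remSet K g khi :=
            mem_remSet_of_ne K g khi hkhiK v (by omega) hloL (by rw [hkhi]; omega)
          intro h; rw [h] at this; simp at this
        · intro x hx y hy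
          have key : ∀ z ∈ remSet K g khi, z = v := by
            intro z hz
            rw [mem_remSet K g khi hkhiK] at hz
            rcases hz with ⟨hz0, hz1 | ⟨k, hk, hkneq, hkv⟩⟩
            · rw [hkhi] at hz1; omega
            · have : z = v ∨ z = v2 := (hmem2 z).mp (by rw [← hkv]; exact List.mem_map.mpr ⟨k, hk, rfl⟩)
              rcases this with rfl | rfl
              · rfl
              · exfalso
                have : 2 ≤ (K.map g).count (g khi) := by
                  apply (exists_other_iff_two_le_count K g hnd khi hkhiK).mp
                  exact ⟨k, hk, hkneq, by rw [hkv, hkhi]⟩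
                rw [hkhi] at this; omega
          rw [key x hx, key y hy]
  · -- three or more distinct frequencies: never removable
    rw [hs] at hmem hpw
    have h12 : v < v2 := by
      rcases List.pairwise_cons.mp hpw with ⟨h, _⟩; exact h v2 (by simp)
    have h13 : v < v3 := by
      rcases List.pairwise_cons.mp hpw with ⟨h, _⟩; exact h v3 (by simp)
    have h23 : v2 < v3 := by
      rcases List.pairwise_cons.mp hpw with ⟨_, h2⟩
      rcases List.pairwise_cons.mp h2 with ⟨h, _⟩; exact h v3 (by simp)
    have hm1 : v ∈ K.map g := (hmem v).mp (by simp)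
    have hm2 : v2 ∈ K.map g := (hmem v2).mp (by simp)
    have hm3 : v3 ∈ K.map g := (hmem v3).mp (by simp)
    constructor
    · rintro ⟨ch, hch, ⟨_, hall⟩⟩
      exfalso
      -- two of the three distinct frequencies survive untouched
      have hpick : ∃ x y, x ∈ K.map g ∧ y ∈ K.map g ∧ x ≠ y ∧ x ≠ g ch ∧ y ≠ g ch := by
        by_cases h1 : g ch = v
        · exact ⟨v2, v3, hm2, hm3, by omega, by omega, by omega⟩
        · by_cases h2 : g ch = v2
          · exact ⟨v, v3, hm1, hm3, by omega, by omega, by omega⟩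
          · exact ⟨v, v2, hm1, hm2, by omega, fun h => h1 h.symm, fun h => h2 h.symm⟩
      obtain ⟨x, y, hxL, hyL, hxy, hxv, hyv⟩ := hpick
      have hxR := mem_remSet_of_ne K g ch hch x (by have := hposL x hxL; omega) hxL hxv
      have hyR := mem_remSet_of_ne K g ch hch y (by have := hposL y hyL; omega) hyL hyv
      exact hxy (hall x hxR y hyR)
    · intro h; simp at h

-- ===== VERDICT (by name: the statement is the Claim_ definition above) =====
theorem equalFrequency_spec : Claim_equal_equalFrequency := by
  unfold Claim_equal_equalFrequency Spec_equalFrequency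
  intro word _
  show equalFrequencyLoop (PySem.Dict.counter word.toList) (PySem.Dict.counter word.toList).keys
    = equalFrequency_alt word
  set d := PySem.Dict.counter word.toList with hd
  have hnd : d.keys.Nodup := PySem.Dict.nodup_keys_counter word.toList
  have hpos : ∀ k ∈ d.keys, 1 ≤ d.getD k 0 := by
    intro k hk
    rw [hd, PySem.Dict.getD_counter]
    have hkw : k ∈ word.toList := by
      rw [hd, PySem.Dict.keys_counter, PySem.Set.mem_ofList] at hk
      exact hk
    have := List.one_le_count_iff.mpr hkw
    omega
  have hvals : d.values = d.keys.map (fun k => d.getD k 0) :=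
    PySem.Dict.values_eq_map_keys d hnd 0
  have hsize : d.size = d.keys.length := by
    show d.items.length = (d.items.map (·.1)).length
    rw [List.length_map]
  rw [Bool.eq_iff_iff]
  rw [loop_eq_any d hnd d.keys (fun c hc => hc)]
  have halt : (equalFrequency_alt word = true)
      ↔ ((match PySem.List.sorted (PySem.Set.ofList (d.keys.map (fun k => d.getD k 0))) (fun x => x) false with
         | [v] => (v == 1 && decide (2 ≤ d.keys.length)) || (decide (2 ≤ v) && d.keys.length == 1)
         | [lo, hi] => (lo == 1 && ((d.keys.map (fun k => d.getD k 0)).count lo : Int) == 1)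
                        || (hi == lo + 1 && ((d.keys.map (fun k => d.getD k 0)).count hi : Int) == 1)
         | _ => false) = true) := by
    show ((match PySem.List.sorted (PySem.Dict.counter d.values).keys (fun x => x) false with
         | [v] => (v == 1 && decide (2 ≤ d.size)) || (decide (2 ≤ v) && d.size == 1)
         | [lo, hi] => (lo == 1 && (PySem.Dict.counter d.values).getD lo 0 == 1)
                        || (hi == lo + 1 && (PySem.Dict.counter d.values).getD hi 0 == 1)
         | _ => false) = true) ↔ _
    simp only [PySem.Dict.keys_counter, PySem.Dict.getD_counter, hsize, hvals]
  rw [halt]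
  exact core d.keys (fun k => d.getD k 0) hnd hpos
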